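-- pv_equiv track=rewrite | github.com/aaronirakoze19/Building-a-Multi-Agent-AI-System-for-Real-World-Applications-Customer-Care-Team-Goal | src/supervisor.py | _extract_tool_call
-- ===== SOURCE A (Python) =====
-- def _extract_tool_call(resolver_text: str):
--     """
--     Very small parser:
--     Looks for lines:
--       TOOL: refund
--       TOOL_INPUT: ...
--     """
--     tool = None
--     tool_input = ""
--     for line in (resolver_text or "").splitlines():
--         line = line.strip()
--         if line.upper().startswith("TOOL:"):
--             tool = line.split(":", 1)[1].strip()
--         elif line.upper().startswith("TOOL_INPUT:"):
--             tool_input = line.split(":", 1)[1].strip()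
--     return tool, tool_input
-- ===== SOURCE B (Python) =====
-- def _extract_tool_call(resolver_text: str):
--     """Scan the lines BACK-TO-FRONT, keeping the first match seen for each tag
--     (= last match in document order) and stopping early once both are found."""
--     tool = None
--     tool_input = None
--     for line in reversed((resolver_text or "").splitlines()):
--         line = line.strip()
--         u = line.upper()
--         if tool is None and u.startswith("TOOL:"):
--             tool = line.split(":", 1)[1].strip()
--         elif tool_input is None and u.startswith("TOOL_INPUT:"):
--             tool_input = line.split(":", 1)[1].strip()
--         if tool is not None and tool_input is not None:
--             break
--     return tool, "" if tool_input is None else tool_input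
-- ===== Notes on version B (the rewrite author's own statement) =====
-- stated objective: alternative
-- what changed: A folds forward over all lines overwriting accumulators on every match; B scans the lines back-to-front, keeps only the first match per tag (= last in document order) and stops early once both tags are found.
import Mathlib
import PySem

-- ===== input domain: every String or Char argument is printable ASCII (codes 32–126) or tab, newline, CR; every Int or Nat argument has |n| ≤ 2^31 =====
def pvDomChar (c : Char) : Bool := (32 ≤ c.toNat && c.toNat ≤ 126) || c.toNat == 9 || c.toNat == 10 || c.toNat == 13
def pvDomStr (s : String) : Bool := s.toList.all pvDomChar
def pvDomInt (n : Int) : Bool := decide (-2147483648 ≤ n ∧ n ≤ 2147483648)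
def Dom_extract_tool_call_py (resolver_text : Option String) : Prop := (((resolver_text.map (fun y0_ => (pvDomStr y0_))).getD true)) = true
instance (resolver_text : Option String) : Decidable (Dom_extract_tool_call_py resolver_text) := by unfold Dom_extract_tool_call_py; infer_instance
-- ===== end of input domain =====

-- B replaces A's front-to-back accumulator loop by a back-to-front scan that keeps the
-- first match per tag (= last in document order) and stops early once both are found (objective: alternative).


-- ===== PORT A =====
-- line.split(":", 1)[1] — the [1] is guarded by startswith("TOOL…:"), so a colon exists and
-- Python never raises; the .getD defaults are therefore unreachable (exact).
def pvAfterColon (line : String) : String :=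
  (PySem.List.pyGet? ((PySem.Str.splitMax? line ":" 1).getD []) 1).getD ""

def extract_tool_call_py (resolver_text : Option String) : Option String × String :=
  let text := resolver_text.getD ""   -- (resolver_text or "")
  (PySem.Str.splitlines text).foldl
    (fun st line =>
      let line := PySem.Str.strip line
      if PySem.Str.startswith (PySem.Str.upper line) "TOOL:" then
        (some (PySem.Str.strip (pvAfterColon line)), st.2)
      else if PySem.Str.startswith (PySem.Str.upper line) "TOOL_INPUT:" then
        (st.1, PySem.Str.strip (pvAfterColon line))
      else st)
    (none, "")

-- ===== PORT B =====
def pvScanRev : List String → Option String → Option String → Option String × Option String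
  | [], tool, tool_input => (tool, tool_input)
  | l :: rest, tool, tool_input =>
    let line := PySem.Str.strip l
    let u := PySem.Str.upper line
    let st :=
      if tool = none ∧ PySem.Str.startswith u "TOOL:" then
        (some (PySem.Str.strip (pvAfterColon line)), tool_input)
      else if tool_input = none ∧ PySem.Str.startswith u "TOOL_INPUT:" then
        (tool, some (PySem.Str.strip (pvAfterColon line)))
      else (tool, tool_input)
    if st.1.isSome ∧ st.2.isSome then st else pvScanRev rest st.1 st.2

def extract_tool_call_py_alt (resolver_text : Option String) : Option String × String :=
  let text := resolver_text.getD ""   -- (resolver_text or "")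
  let r := pvScanRev (PySem.Str.splitlines text).reverse none none
  (r.1, match r.2 with | none => "" | some v => v)

-- ===== PRECONDITION & SPEC =====
def Spec_extract_tool_call_py (resolver_text : Option String) (out : Option String × String) : Prop := out = extract_tool_call_py_alt resolver_text
instance (resolver_text : Option String) (out : Option String × String) : Decidable (Spec_extract_tool_call_py resolver_text out) := by unfold Spec_extract_tool_call_py; infer_instance

-- ===== CLAIM (what is proved, stated in full; the proofs are below) =====
def Claim_equal_extract_tool_call_py : Prop := ∀ (resolver_text : Option String), Dom_extract_tool_call_py resolver_text → Spec_extract_tool_call_py resolver_text (extract_tool_call_py resolver_text)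

-- ===== LEMMAS AND PROOFS =====

-- per-line extractors: the value a TOOL: / TOOL_INPUT: line contributes, none otherwise
def pvFT (l : String) : Option String :=
  if PySem.Str.startswith (PySem.Str.upper (PySem.Str.strip l)) "TOOL:" then
    some (PySem.Str.strip (pvAfterColon (PySem.Str.strip l))) else none

def pvFI (l : String) : Option String :=
  if PySem.Str.startswith (PySem.Str.upper (PySem.Str.strip l)) "TOOL_INPUT:" then
    some (PySem.Str.strip (pvAfterColon (PySem.Str.strip l))) else none

-- a line cannot start with both "TOOL:" and "TOOL_INPUT:" (5th character ':' vs '_')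
theorem pv_excl (u : String) (h1 : PySem.Str.startswith u "TOOL:" = true) :
    PySem.Str.startswith u "TOOL_INPUT:" = false := by
  by_contra h
  have h2 : PySem.Str.startswith u "TOOL_INPUT:" = true := by
    cases hb : PySem.Str.startswith u "TOOL_INPUT:" <;> simp_all
  rw [PySem.Str.startswith_eq, PySem.Chars.startswith_iff] at h1 h2
  have h3 : ("TOOL_INPUT:".toList.take 5) <+: u.toList := (List.take_prefix 5 _).trans h2
  have h4 := List.prefix_of_prefix_length_le h1 h3 (by decide)
  have := h4.eq_of_length (by decide)
  simp at this

theorem pv_foldlA (ls : List String) : ∀ (t : Option String) (ti : String),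
    ls.foldl
      (fun st line =>
        let line := PySem.Str.strip line
        if PySem.Str.startswith (PySem.Str.upper line) "TOOL:" then
          (some (PySem.Str.strip (pvAfterColon line)), st.2)
        else if PySem.Str.startswith (PySem.Str.upper line) "TOOL_INPUT:" then
          (st.1, PySem.Str.strip (pvAfterColon line))
        else st)
      (t, ti)
    = ((ls.reverse.findSome? pvFT).or t, (ls.reverse.findSome? pvFI).getD ti) := by
  induction ls with
  | nil => intro t ti; simp
  | cons l r ih =>
    intro t ti
    simp only [List.foldl_cons, List.reverse_cons, List.findSome?_append]
    by_cases h1 : PySem.Str.startswith (PySem.Str.upper (PySem.Str.strip l)) "TOOL:" = true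
    · have h2 := pv_excl _ h1
      simp only [h1, if_pos, ih]
      simp at h1 h2
      simp [pvFT, pvFI, h1, h2]
    · by_cases h2 : PySem.Str.startswith (PySem.Str.upper (PySem.Str.strip l)) "TOOL_INPUT:" = true
      · simp only [h1, h2, if_pos, ih]
        simp at h1 h2
        simp [pvFT, pvFI, h1, h2]
      · simp only [h1, h2, ih]
        simp at h1 h2
        simp [pvFT, pvFI, h1, h2]

theorem pv_scanB (xs : List String) : ∀ (t ti : Option String),
    pvScanRev xs t ti = (t.or (xs.findSome? pvFT), ti.or (xs.findSome? pvFI)) := by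
  induction xs with
  | nil => intro t ti; simp [pvScanRev]
  | cons l r ih =>
    intro t ti
    simp only [pvScanRev, List.findSome?_cons]
    by_cases h1 : (t = none ∧ PySem.Str.startswith (PySem.Str.upper (PySem.Str.strip l)) "TOOL:" = true)
    · obtain ⟨ht, hs⟩ := h1
      have h2 := pv_excl _ hs
      subst ht
      simp only [hs, and_true, if_pos]
      simp at hs h2
      cases hti : ti with
      | some v => simp [pvFT, pvFI, hs, h2]
      | none =>
        simp only [Option.isSome_some, Option.isSome_none, and_false, Bool.false_eq_true,
          if_false, ih]
        simp [pvFT, pvFI, hs, h2]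
    · by_cases h2 : (ti = none ∧ PySem.Str.startswith (PySem.Str.upper (PySem.Str.strip l)) "TOOL_INPUT:" = true)
      · obtain ⟨hti, hs⟩ := h2
        subst hti
        simp only [if_neg h1, hs, and_true, if_pos]
        cases ht : t with
        | some v =>
          simp at hs
          simp [pvFT, pvFI, hs]
        | none =>
          have hT : PySem.Str.startswith (PySem.Str.upper (PySem.Str.strip l)) "TOOL:" = false := by
            cases hb : PySem.Str.startswith (PySem.Str.upper (PySem.Str.strip l)) "TOOL:" <;> simp_all
          simp only [Option.isSome_none, false_and, if_false, Bool.false_eq_true, ih]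
          simp at hs hT
          simp [pvFT, pvFI, hs, hT]
      · simp only [if_neg h1, if_neg h2]
        have hT' : t.or (pvFT l) = t := by
          cases ht : t with
          | some v => simp
          | none =>
            have hc : PySem.Str.startswith (PySem.Str.upper (PySem.Str.strip l)) "TOOL:" = false := by
              by_contra hcc
              exact h1 ⟨ht, by cases hx : PySem.Str.startswith (PySem.Str.upper (PySem.Str.strip l)) "TOOL:" <;> simp_all⟩
            simp at hc
            simp [pvFT, hc]
        have hI' : ti.or (pvFI l) = ti := by
          cases hti : ti with
          | some v => simp
          | none =>
            have hc : PySem.Str.startswith (PySem.Str.upper (PySem.Str.strip l)) "TOOL_INPUT:" = false := by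
              by_contra hcc
              exact h2 ⟨hti, by cases hx : PySem.Str.startswith (PySem.Str.upper (PySem.Str.strip l)) "TOOL_INPUT:" <;> simp_all⟩
            simp at hc
            simp [pvFI, hc]
        by_cases hb : (t.isSome = true ∧ ti.isSome = true)
        · simp only [hb.1, hb.2, and_self, if_pos]
          obtain ⟨v, hv⟩ := Option.isSome_iff_exists.mp hb.1
          obtain ⟨w, hw⟩ := Option.isSome_iff_exists.mp hb.2
          subst hv hw
          simp
        · rw [if_neg hb, ih]
          clear h1 h2 hb ih
          cases hft : pvFT l <;> cases hfi : pvFI l <;>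
            rw [hft] at hT' <;> rw [hfi] at hI' <;>
            cases t <;> cases ti <;> simp_all

-- ===== VERDICT (by name: the statement is the Claim_ definition above) =====
theorem extract_tool_call_py_spec : Claim_equal_extract_tool_call_py := by
  intro resolver_text _
  unfold Spec_extract_tool_call_py extract_tool_call_py extract_tool_call_py_alt
  simp only [pv_foldlA, pv_scanB, Option.none_or, Option.or_none]
  cases (PySem.Str.splitlines (resolver_text.getD "")).reverse.findSome? pvFI <;> rfl
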